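-- pv_equiv track=rewrite | github.com/ronaldahmed/morph-bandit | cipher/conllu2txt.py | map_um_bundle_to_pos
-- ===== SOURCE A (Python) =====
-- import unicodedata
--
-- um2char = {
--   "ADJ" :'A',
--   "ADP" :"B",
--   "ADV" :'C',
--   "ART" : 'D',
--   "AUX" :"E",
--   "CLF" :'F',
--   "COMP":'G',
--   "CONJ":'H',
--   "DET" :"I",
--   "INTJ"  :'J',
--   "N"  :'K',
--   "NUM" :'L',
--   "PART":'M',
--   "PRO"  :"N",
--   "PROPN" :'O',
--   "V"  :"P",
--   "V.CVB":"Q",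
--   "V.MSDR":"R",
--   "V.PTCP":"S",
--   "PUNCT":"T",
--   "_":"U",
-- }
--
-- def test_punct(token):
--   for c in token:
--     if unicodedata.category(c)[0] != 'P':
--       return False
--   return True
--
-- def test_num(token):
--   for c in token:
--     if unicodedata.category(c)[0] != 'N':
--       return False
--   return True
--
-- def map_um_bundle_to_pos(token,bundle):
--   # precedence of V subclasses over V,ADJ
--   precedence = [
--     "V.CVB",
--     "V.MSDR",
--     "V.PTCP",
--   ]
--
--   all_pos = list(um2char.keys())
--   fine_grained = bundle.split(";")
--   for f in fine_grained:
--     if f in precedence: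
--       return f
--   for f in fine_grained:
--     if f in all_pos and f!="_":
--       return f
--   # special cases
--   if test_punct(token):
--     return "PUNCT"
--   if test_num(token):
--     return "NUM"
--
--   return "_"
-- ===== SOURCE B (Python) =====
-- import unicodedata
--
-- _PRECEDENCE = frozenset({"V.CVB", "V.MSDR", "V.PTCP"})
--
-- _ALL_POS = frozenset({
--     "ADJ", "ADP", "ADV", "ART", "AUX", "CLF", "COMP", "CONJ", "DET", "INTJ",
--     "N", "NUM", "PART", "PRO", "PROPN", "V", "V.CVB", "V.MSDR", "V.PTCP",
--     "PUNCT", "_",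
-- })
--
-- def map_um_bundle_to_pos(token, bundle):
--     # one pass: precedence tags return immediately; remember the FIRST
--     # ordinary tag (never overwrite) as a fallback.
--     fallback = None
--     for f in bundle.split(";"):
--         if f in _PRECEDENCE:
--             return f
--         if fallback is None and f in _ALL_POS and f != "_":
--             fallback = f
--     if fallback is not None:
--         return fallback
--     if all(unicodedata.category(c)[0] == 'P' for c in token):
--         return "PUNCT"
--     if all(unicodedata.category(c)[0] == 'N' for c in token):
--         return "NUM"
--     return "_"
-- ===== Notes on version B (the rewrite author's own statement) =====
-- stated objective: alternative
-- what changed: Replaces A's two sequential scans over the split bundle with a single scan that returns precedence tags immediately and records the first ordinary tag as a never-overwritten fallback, with set-based membership and all() replacing the hand-written punct/num loops.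
import Mathlib
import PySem

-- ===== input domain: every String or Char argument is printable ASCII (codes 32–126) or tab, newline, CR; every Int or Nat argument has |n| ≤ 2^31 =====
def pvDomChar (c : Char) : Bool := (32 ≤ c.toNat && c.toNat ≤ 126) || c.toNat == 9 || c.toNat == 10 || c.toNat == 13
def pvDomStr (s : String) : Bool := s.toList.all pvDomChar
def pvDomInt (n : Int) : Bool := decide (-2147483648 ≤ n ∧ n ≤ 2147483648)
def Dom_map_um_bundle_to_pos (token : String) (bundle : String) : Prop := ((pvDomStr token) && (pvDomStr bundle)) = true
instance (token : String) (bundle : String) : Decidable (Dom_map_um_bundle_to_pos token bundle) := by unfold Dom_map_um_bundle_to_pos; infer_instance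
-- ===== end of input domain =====

-- B replaces A's two sequential scans over the split bundle by a single scan with a
-- never-overwritten fallback and set-based membership (objective: alternative decomposition).

-- shared module context: unicodedata.category(c)[0] == 'P' / == 'N',
-- exact on the stated ASCII(+tab/newline/CR) domain
def pvCatIsP (c : Char) : Bool := "!\"#%&'()*,-./:;?@[\\]_{}".toList.contains c
def pvCatIsN (c : Char) : Bool := '0' ≤ c && c ≤ '9'

-- ===== PORT A =====
def um2char : PySem.Dict String String := PySem.Dict.ofList
  [("ADJ","A"),("ADP","B"),("ADV","C"),("ART","D"),("AUX","E"),("CLF","F"),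
   ("COMP","G"),("CONJ","H"),("DET","I"),("INTJ","J"),("N","K"),("NUM","L"),
   ("PART","M"),("PRO","N"),("PROPN","O"),("V","P"),("V.CVB","Q"),("V.MSDR","R"),
   ("V.PTCP","S"),("PUNCT","T"),("_","U")]

def test_punct : List Char → Bool
  | [] => true
  | c :: rest => if !(pvCatIsP c) then false else test_punct rest

def test_num : List Char → Bool
  | [] => true
  | c :: rest => if !(pvCatIsN c) then false else test_num rest

def pvPrecedence : List String := ["V.CVB", "V.MSDR", "V.PTCP"]

-- first loop: first f in precedence
def pvFindPrec : List String → Option String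
  | [] => none
  | f :: rest => if pvPrecedence.contains f then some f else pvFindPrec rest

-- second loop: first f in all_pos with f != "_"
def pvFindPos (allPos : List String) : List String → Option String
  | [] => none
  | f :: rest => if allPos.contains f && f != "_" then some f else pvFindPos allPos rest

def map_um_bundle_to_pos (token : String) (bundle : String) : String :=
  let all_pos := um2char.keys
  let fine_grained := (PySem.Str.split? bundle ";").getD []
  match pvFindPrec fine_grained with
  | some f => f
  | none =>
    match pvFindPos all_pos fine_grained with
    | some f => f
    | none =>
      if test_punct token.toList then "PUNCT"
      else if test_num token.toList then "NUM"
      else "_"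

-- ===== PORT B =====
def pvPrecSet : PySem.Set String := PySem.Set.ofList ["V.CVB", "V.MSDR", "V.PTCP"]

def pvAllPosSet : PySem.Set String := PySem.Set.ofList
  ["ADJ","ADP","ADV","ART","AUX","CLF","COMP","CONJ","DET","INTJ","N","NUM",
   "PART","PRO","PROPN","V","V.CVB","V.MSDR","V.PTCP","PUNCT","_"]

-- single scan: precedence tag returns immediately; the FIRST ordinary tag is kept as fallback
def pvScan : List String → Option String → Option String
  | [], fb => fb
  | f :: rest, fb =>
    if PySem.Set.contains pvPrecSet f then some f
    else pvScan rest
      (if fb.isNone && PySem.Set.contains pvAllPosSet f && f != "_" then some f else fb)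

def map_um_bundle_to_pos_alt (token : String) (bundle : String) : String :=
  match pvScan ((PySem.Str.split? bundle ";").getD []) none with
  | some f => f
  | none =>
    if token.toList.all pvCatIsP then "PUNCT"
    else if token.toList.all pvCatIsN then "NUM"
    else "_"

-- ===== PRECONDITION & SPEC =====
def Spec_map_um_bundle_to_pos (token : String) (bundle : String) (out : String) : Prop := out = map_um_bundle_to_pos_alt token bundle
instance (token : String) (bundle : String) (out : String) : Decidable (Spec_map_um_bundle_to_pos token bundle out) := by unfold Spec_map_um_bundle_to_pos; infer_instance

-- ===== CLAIM (what is proved, stated in full; the proofs are below) =====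
def Claim_equal_map_um_bundle_to_pos : Prop := ∀ (token : String) (bundle : String), Dom_map_um_bundle_to_pos token bundle → Spec_map_um_bundle_to_pos token bundle (map_um_bundle_to_pos token bundle)

-- ===== LEMMAS AND PROOFS =====

lemma pvPrecSet_eq : pvPrecSet = pvPrecedence := by decide

lemma pvAllPosSet_eq : pvAllPosSet = um2char.keys := by decide

lemma pvScan_eq (fs : List String) (fb : Option String) :
    pvScan fs fb =
      match pvFindPrec fs with
      | some f => some f
      | none => match fb with
        | some g => some g
        | none => pvFindPos um2char.keys fs := by
  induction fs generalizing fb with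
  | nil => cases fb <;> simp [pvScan, pvFindPrec, pvFindPos]
  | cons f rest ih =>
    by_cases hp : f ∈ pvPrecedence
    · simp [pvScan, pvFindPrec, pvPrecSet_eq, PySem.Set.contains, hp]
    · cases fb with
      | some g =>
        simp [pvScan, pvFindPrec, pvPrecSet_eq, PySem.Set.contains, hp, ih]
      | none =>
        by_cases ho : f ∈ um2char.keys ∧ ¬f = "_"
        · simp [pvScan, pvFindPrec, pvFindPos, pvPrecSet_eq, pvAllPosSet_eq,
            PySem.Set.contains, hp, ho, ih]
        · simp [pvScan, pvFindPrec, pvFindPos, pvPrecSet_eq, pvAllPosSet_eq,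
            PySem.Set.contains, hp, ho, ih]

lemma test_punct_eq (cs : List Char) : test_punct cs = cs.all pvCatIsP := by
  induction cs with
  | nil => rfl
  | cons c rest ih => by_cases h : pvCatIsP c <;> simp [test_punct, h, ih]

lemma test_num_eq (cs : List Char) : test_num cs = cs.all pvCatIsN := by
  induction cs with
  | nil => rfl
  | cons c rest ih => by_cases h : pvCatIsN c <;> simp [test_num, h, ih]

-- ===== VERDICT (by name: the statement is the Claim_ definition above) =====
theorem map_um_bundle_to_pos_spec : Claim_equal_map_um_bundle_to_pos := by
  intro token bundle _
  unfold Spec_map_um_bundle_to_pos map_um_bundle_to_pos map_um_bundle_to_pos_alt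
  rw [pvScan_eq, test_punct_eq, test_num_eq]
  cases h1 : pvFindPrec ((PySem.Str.split? bundle ";").getD []) <;>
    cases h2 : pvFindPos um2char.keys ((PySem.Str.split? bundle ";").getD []) <;>
      simp [h1, h2]
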